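-- pv_equiv track=rewrite | github.com/minthf/codewars | max_sum_between_two_negatives.py | max_sum_between_two_negatives
-- ===== SOURCE A (Python) =====
-- def max_sum_between_two_negatives(arr):
--     max = 0
--     sum = 0
--     flag = False
--     count = 0
--     for el in arr:
--         if el < 0:
--             count += 1
--             if flag:
--                 if max < sum: max = sum
--                 sum = 0
--             else:
--                 flag = True
--         else:
--             if flag:
--                 sum += el
--     if count <= 1: return -1
--     return max
-- ===== SOURCE B (Python) =====
-- def max_sum_between_two_negatives(arr):
--     # Split arr into segments delimited by negatives: each negative closes the
--     # current segment.  Segments after the first one lie between two negatives.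
--     parts = []
--     cur = []
--     for el in arr:
--         if el < 0:
--             parts.append(cur)
--             cur = []
--         else:
--             cur.append(el)
--     if len(parts) <= 1:
--         return -1
--     best = 0
--     for seg in parts[1:]:
--         s = sum(seg)
--         if best < s:
--             best = s
--     return best
-- ===== Notes on version B (the rewrite author's own statement) =====
-- stated objective: alternative
-- what changed: Replaces A's single-pass flag/sum/max state machine with a two-phase decomposition: first build the table of segments delimited by negatives, then take the max of the sums of the segments after the first (those between two negatives).
import Mathlib
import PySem

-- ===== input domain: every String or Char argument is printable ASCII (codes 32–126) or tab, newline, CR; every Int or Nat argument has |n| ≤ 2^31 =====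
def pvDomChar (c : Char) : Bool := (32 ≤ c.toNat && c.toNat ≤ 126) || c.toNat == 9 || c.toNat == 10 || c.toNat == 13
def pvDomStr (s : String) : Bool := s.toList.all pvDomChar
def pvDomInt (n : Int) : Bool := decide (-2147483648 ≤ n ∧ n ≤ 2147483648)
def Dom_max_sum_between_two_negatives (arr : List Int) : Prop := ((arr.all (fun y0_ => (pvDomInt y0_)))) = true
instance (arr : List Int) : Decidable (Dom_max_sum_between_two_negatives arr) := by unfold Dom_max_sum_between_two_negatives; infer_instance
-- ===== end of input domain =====

-- B replaces A's inline flag/sum/max state machine by first building the table of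
-- segments between negatives and then taking the max of their sums (alternative
-- decomposition, same O(n) cost).

-- ===== PORT A =====
-- state: (max, sum, flag, count), exactly A's loop body
def msA_step (st : Int × Int × Bool × Int) (el : Int) : Int × Int × Bool × Int :=
  if el < 0 then
    if st.2.2.1 then
      ((if st.1 < st.2.1 then st.2.1 else st.1), 0, st.2.2.1, st.2.2.2 + 1)
    else
      (st.1, st.2.1, true, st.2.2.2 + 1)
  else
    if st.2.2.1 then (st.1, st.2.1 + el, st.2.2.1, st.2.2.2) else st

def max_sum_between_two_negatives (arr : List Int) : Int :=
  let st := arr.foldl msA_step (0, 0, false, 0)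
  if st.2.2.2 ≤ 1 then -1 else st.1

-- ===== PORT B =====
-- state: (parts, cur); each negative closes the current segment
def msB_step (st : List (List Int) × List Int) (el : Int) : List (List Int) × List Int :=
  if el < 0 then (st.1 ++ [st.2], []) else (st.1, st.2 ++ [el])

-- best = 0; for seg in parts[1:]: s = sum(seg); if best < s: best = s
def msB_best (parts : List (List Int)) : Int :=
  (parts.drop 1).foldl (fun best seg => if best < seg.sum then seg.sum else best) 0

def max_sum_between_two_negatives_alt (arr : List Int) : Int :=
  let st := arr.foldl msB_step ([], [])
  if (st.1.length : Int) ≤ 1 then -1 else msB_best st.1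

-- ===== PRECONDITION & SPEC =====
def Spec_max_sum_between_two_negatives (arr : List Int) (out : Int) : Prop := out = max_sum_between_two_negatives_alt arr
instance (arr : List Int) (out : Int) : Decidable (Spec_max_sum_between_two_negatives arr out) := by unfold Spec_max_sum_between_two_negatives; infer_instance

-- ===== CLAIM (what is proved, stated in full; the proofs are below) =====
def Claim_equal_max_sum_between_two_negatives : Prop := ∀ (arr : List Int), Dom_max_sum_between_two_negatives arr → Spec_max_sum_between_two_negatives arr (max_sum_between_two_negatives arr)

-- ===== LEMMAS AND PROOFS =====

-- A's loop state expressed from B's loop state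
def msInv (parts : List (List Int)) (cur : List Int) : Int × Int × Bool × Int :=
  (msB_best parts, (if parts.isEmpty then 0 else cur.sum), !parts.isEmpty, (parts.length : Int))

lemma ms_best_append (a : List Int) (t : List (List Int)) (cur : List Int) :
    msB_best ((a :: t) ++ [cur]) =
      (if msB_best (a :: t) < cur.sum then cur.sum else msB_best (a :: t)) := by
  simp [msB_best, List.foldl_append]

lemma ms_step_inv (parts : List (List Int)) (cur : List Int) (el : Int) :
    msA_step (msInv parts cur) el =
      msInv (msB_step (parts, cur) el).1 (msB_step (parts, cur) el).2 := by
  by_cases h : el < 0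
  · cases parts with
    | nil => simp [msA_step, msB_step, msInv, msB_best, h]
    | cons a t =>
      simp only [msA_step, msB_step, msInv, h, if_pos, List.isEmpty_cons, Bool.not_false,
        ms_best_append]
      simp [List.length_append]
  · cases parts with
    | nil => simp [msA_step, msB_step, msInv, h]
    | cons a t => simp [msA_step, msB_step, msInv, h]

lemma ms_loop : ∀ (arr : List Int) (parts : List (List Int)) (cur : List Int),
    arr.foldl msA_step (msInv parts cur) =
      msInv (arr.foldl msB_step (parts, cur)).1 (arr.foldl msB_step (parts, cur)).2
  | [], _, _ => rfl
  | el :: rest, parts, cur => by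
    simp only [List.foldl_cons, ms_step_inv]
    have := ms_loop rest (msB_step (parts, cur) el).1 (msB_step (parts, cur) el).2
    simpa using this

-- ===== VERDICT (by name: the statement is the Claim_ definition above) =====
theorem max_sum_between_two_negatives_spec : Claim_equal_max_sum_between_two_negatives := by
  intro arr _
  unfold Spec_max_sum_between_two_negatives max_sum_between_two_negatives
    max_sum_between_two_negatives_alt
  have h := ms_loop arr [] []
  have h0 : msInv [] [] = (0, 0, false, 0) := by simp [msInv, msB_best]
  rw [h0] at h
  rw [h]
  simp [msInv]
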